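-- pv_equiv track=rewrite | github.com/ethanlchristensen/AdventOfCode2024 | solutions/15-day-fifteen/15-day-fifteen.py | push_boxes
-- ===== SOURCE A (Python) =====
-- def push_boxes(point, dir, data):
--     points = [point]
--     current_point = point
--     current_point_value = data[point[1]][point[0]]
--     while current_point_value != ".":
--         current_point = current_point[0] + dir[0], current_point[1] + dir[1]
--         current_point_value = data[current_point[1]][current_point[0]]
--         points.append(current_point)
--
--     data_copy = data[:]
--
--     for idx in range(len(points) - 1,  0, -1):
--         p1 = points[idx]
--         p2 = points[idx - 1]
--         tmp = data[p1[1]][p1[0]]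
--         data[p1[1]][p1[0]] = data[p2[1]][p2[0]]
--         data[p2[1]][p2[0]] = tmp
--
--     return data
-- ===== SOURCE B (Python) =====
-- def push_boxes(point, dir, data):
--     x, y = point
--     carry = "."
--     while True:
--         cur = data[y][x]
--         data[y][x] = carry
--         if cur == ".":
--             return data
--         carry = cur
--         x += dir[0]
--         y += dir[1]
-- ===== Notes on version B (the rewrite author's own statement) =====
-- stated objective: simpler
-- what changed: B fuses A's two passes (forward scan collecting a points list, then a backward swap loop) into a single forward pass that threads a carried value, writing the carry into each cell as it walks and stopping at the first '.'; the points list and the dead data_copy disappear.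
import Mathlib
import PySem

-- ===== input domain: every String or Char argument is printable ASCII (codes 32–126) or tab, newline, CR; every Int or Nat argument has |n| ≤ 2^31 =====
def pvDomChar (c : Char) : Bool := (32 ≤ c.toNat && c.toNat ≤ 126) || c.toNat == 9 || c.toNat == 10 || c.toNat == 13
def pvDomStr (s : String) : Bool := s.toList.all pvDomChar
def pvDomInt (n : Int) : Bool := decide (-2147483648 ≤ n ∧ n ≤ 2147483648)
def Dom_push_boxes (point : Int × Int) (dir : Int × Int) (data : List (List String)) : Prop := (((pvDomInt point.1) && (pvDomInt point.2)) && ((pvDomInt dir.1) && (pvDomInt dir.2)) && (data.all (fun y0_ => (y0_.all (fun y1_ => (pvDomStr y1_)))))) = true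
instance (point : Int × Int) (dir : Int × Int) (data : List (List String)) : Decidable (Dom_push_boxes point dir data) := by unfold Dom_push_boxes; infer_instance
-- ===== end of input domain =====

-- B fuses A's forward scan + backward swap loop into ONE forward pass threading a carried value
-- (objective: simpler — no points list, no dead data_copy). Python A and B both mutate `data` in
-- place and return it; the equivalence proved here is about the RETURN value.

-- shared indexing helpers: data[y][x] read and write with Python's negative-index wraparound
def pvGetCell (data : List (List String)) (x y : Int) : Option String :=
  (PySem.List.pyGet? data y).bind fun row => PySem.List.pyGet? row x

def pvGetCellD (data : List (List String)) (x y : Int) : String :=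
  (pvGetCell data x y).getD ""

def pvSetCell (data : List (List String)) (x y : Int) (v : String) : List (List String) :=
  PySem.List.pySetD data y
    (PySem.List.pySetD ((PySem.List.pyGet? data y).getD []) x v)

-- total cells + 1: enough fuel for any walk admitted by Pre_ (distinct cells)
def pvCells (data : List (List String)) : Nat :=
  data.foldl (fun n row => n + row.length) 0

-- ===== PORT A =====
-- A's while-loop: collect the points from `point` along `dir` until the first "." (fuel encodes
-- the loop's unbounded nature; `none` = IndexError or fuel exhausted, both outside Pre_)
def pvScanA (dir : Int × Int) (data : List (List String)) : Nat → (Int × Int) → Option (List (Int × Int))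
  | 0, _ => none
  | fuel + 1, p =>
    match pvGetCell data p.1 p.2 with
    | none => none
    | some v =>
      if v = "." then some [p]
      else
        match pvScanA dir data fuel (p.1 + dir.1, p.2 + dir.2) with
        | none => none
        | some ps => some (p :: ps)

-- one iteration of A's backward for-loop: swap points[idx] and points[idx-1]
def pvSwapStep (points : List (Int × Int)) (d : List (List String)) (idx : Int) : List (List String) :=
  let p1 := PySem.List.pyGetD points idx (0, 0)
  let p2 := PySem.List.pyGetD points (idx - 1) (0, 0)
  let tmp := pvGetCellD d p1.1 p1.2
  let d1 := pvSetCell d p1.1 p1.2 (pvGetCellD d p2.1 p2.2)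
  pvSetCell d1 p2.1 p2.2 tmp

def push_boxes (point : Int × Int) (dir : Int × Int) (data : List (List String)) : List (List String) :=
  match pvScanA dir data (pvCells data + 1) point with
  | none => data
  | some points =>
    (PySem.List.pyRange ((points.length : Int) - 1) 0 (-1)).foldl (pvSwapStep points) data

-- ===== PORT B =====
-- B's single forward pass: write the carry, pick up the old value, stop at "."
def pvPushLoop (dir : Int × Int) : Nat → Int → Int → String → List (List String) → List (List String)
  | 0, _, _, _, d => d
  | fuel + 1, x, y, carry, d =>
    match pvGetCell d x y with
    | none => d
    | some cur =>
      let d' := pvSetCell d x y carry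
      if cur = "." then d' else pvPushLoop dir fuel (x + dir.1) (y + dir.2) cur d'

def push_boxes_alt (point : Int × Int) (dir : Int × Int) (data : List (List String)) : List (List String) :=
  pvPushLoop dir (pvCells data + 1) point.1 point.2 "." data

-- ===== PRECONDITION & SPEC =====
def pvPath (point dir : Int × Int) (i : Nat) : Int × Int :=
  (point.1 + i * dir.1, point.2 + i * dir.2)

-- the (row, column) cell a point denotes after Python's negative-index resolution
def pvCellId (data : List (List String)) (p : Int × Int) : Option (Nat × Nat) :=
  (PySem.List.pyIdx? data.length p.2).bind fun r =>
    (PySem.List.pyIdx? ((data[r]?.getD []).length) p.1).map fun c => (r, c)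

-- Pre_ excludes the inputs on which A raises IndexError or loops forever (the walk leaves the grid
-- or never reaches a "."), and the wrapped walks that REVISIT a cell (possible only via Python's
-- negative-index wraparound on ragged rows), on which A's double-swap of one cell is an accident
-- of its two-pass implementation and B's single pass is an equally defensible choice.
def Pre_push_boxes (point : Int × Int) (dir : Int × Int) (data : List (List String)) : Prop :=
  ∃ k < pvCells data + 1,
    (∀ i < k, pvGetCell data (pvPath point dir i).1 (pvPath point dir i).2 ≠ none ∧
              pvGetCell data (pvPath point dir i).1 (pvPath point dir i).2 ≠ some ".") ∧
    pvGetCell data (pvPath point dir k).1 (pvPath point dir k).2 = some "." ∧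
    (∀ i < k, ∀ j < k, i ≠ j →
      pvCellId data (pvPath point dir i) ≠ pvCellId data (pvPath point dir j))

instance (point : Int × Int) (dir : Int × Int) (data : List (List String)) : Decidable (Pre_push_boxes point dir data) := by
  unfold Pre_push_boxes; infer_instance

def pvWitness_push_boxes : (Int × Int) × (Int × Int) × List (List String) :=
  ((0, 0), (1, 0), [["O", "O", "."], [".", "#"]])

def Spec_push_boxes (point : Int × Int) (dir : Int × Int) (data : List (List String)) (out : List (List String)) : Prop := out = push_boxes_alt point dir data
instance (point : Int × Int) (dir : Int × Int) (data : List (List String)) (out : List (List String)) : Decidable (Spec_push_boxes point dir data out) := by unfold Spec_push_boxes; infer_instance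

-- ===== CLAIM (what is proved, stated in full; the proofs are below) =====
def Claim_equal_push_boxes : Prop := ∀ (point : Int × Int) (dir : Int × Int) (data : List (List String)), Dom_push_boxes point dir data → Pre_push_boxes point dir data → Spec_push_boxes point dir data (push_boxes point dir data)

-- ===== LEMMAS AND PROOFS =====

theorem push_boxes_witness_pre :
    Dom_push_boxes pvWitness_push_boxes.1 pvWitness_push_boxes.2.1 pvWitness_push_boxes.2.2 ∧
    Pre_push_boxes pvWitness_push_boxes.1 pvWitness_push_boxes.2.1 pvWitness_push_boxes.2.2 := by
  constructor
  · decide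
  · exact ⟨2, by decide, by decide, by decide, by decide⟩


-- cell-level view of the grid: read/write at a resolved (row, column) pair
def pvCget (d : List (List String)) (rc : Nat × Nat) : Option String :=
  (d[rc.1]?.getD [])[rc.2]?

def pvCset (d : List (List String)) (rc : Nat × Nat) (v : String) : List (List String) :=
  d.set rc.1 ((d[rc.1]?.getD []).set rc.2 v)

def pvValid (d : List (List String)) (rc : Nat × Nat) : Prop :=
  rc.1 < d.length ∧ rc.2 < (d[rc.1]?.getD []).length

def pvShape (d e : List (List String)) : Prop :=
  d.length = e.length ∧ ∀ r : Nat, (d[r]?.getD []).length = (e[r]?.getD []).length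

theorem pvShape_refl (d : List (List String)) : pvShape d d := ⟨rfl, fun _ => rfl⟩

theorem pvIdx_lt {n : Nat} {i : Int} {m : Nat} (h : PySem.List.pyIdx? n i = some m) : m < n := by
  simp only [PySem.List.pyIdx?] at h
  split_ifs at h <;> simp_all <;> omega

theorem pvCellId_valid {d : List (List String)} {p : Int × Int} {rc : Nat × Nat}
    (h : pvCellId d p = some rc) : pvValid d rc := by
  simp only [pvCellId, Option.bind_eq_some_iff, Option.map_eq_some_iff] at h
  obtain ⟨r, hr, c, hc, rfl⟩ := h
  exact ⟨pvIdx_lt hr, pvIdx_lt hc⟩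

theorem pvGetCell_eq (d : List (List String)) (p : Int × Int) :
    pvGetCell d p.1 p.2 = (pvCellId d p).bind (pvCget d) := by
  simp only [pvGetCell, pvCellId, PySem.List.pyGet?]
  cases hy : PySem.List.pyIdx? d.length p.2 with
  | none => simp
  | some r =>
    have hr := pvIdx_lt hy
    simp only [Option.bind_some]
    cases hrow : d[r]? with
    | none => simp at hrow; omega
    | some row =>
      simp only [Option.bind_some, Option.getD_some]
      cases hx : PySem.List.pyIdx? row.length p.1 with
      | none => simp
      | some c => simp [pvCget, hrow]

theorem pvSet_getElem_self (l : List (List String)) (r : Nat) :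
    l.set r (l[r]?.getD []) = l := by
  apply List.ext_getElem?
  intro j
  rw [List.getElem?_set]
  split_ifs with h1 h2
  · subst h1
    simp [List.getElem?_eq_getElem h2]
  · subst h1
    exact (List.getElem?_eq_none_iff.2 (by omega)).symm
  · rfl

theorem pvSetCell_eq (d : List (List String)) (p : Int × Int) (v : String) :
    pvSetCell d p.1 p.2 v =
      match pvCellId d p with
      | none => d
      | some rc => pvCset d rc v := by
  cases hy : PySem.List.pyIdx? d.length p.2 with
  | none =>
    have hy' : PySem.List.pyGet? d p.2 = none := by simp [PySem.List.pyGet?, hy]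
    simp [pvSetCell, pvCellId, PySem.List.pySetD, PySem.List.pySet?, hy, hy']
  | some r =>
    have hr := pvIdx_lt hy
    have hrow : d[r]? = some d[r] := List.getElem?_eq_getElem hr
    have hy' : PySem.List.pyGet? d p.2 = some d[r] := by
      simp [PySem.List.pyGet?, hy, hrow]
    cases hx : PySem.List.pyIdx? (d[r].length) p.1 with
    | none =>
      have h1 : PySem.List.pySetD d[r] p.1 v = d[r] := by
        simp [PySem.List.pySetD, PySem.List.pySet?, hx]
      have h2 : PySem.List.pySetD d p.2 d[r] = d.set r d[r] := by
        simp [PySem.List.pySetD, PySem.List.pySet?, hy]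
      have h3 : d.set r d[r] = d := by
        have := pvSet_getElem_self d r
        rwa [hrow, Option.getD_some] at this
      simp [pvSetCell, pvCellId, hy, hx, hy', h1, h2, h3, hrow]
    | some c =>
      have h1 : PySem.List.pySetD d[r] p.1 v = d[r].set c v := by
        simp [PySem.List.pySetD, PySem.List.pySet?, hx]
      have h2 : PySem.List.pySetD d p.2 (d[r].set c v) = d.set r (d[r].set c v) := by
        simp [PySem.List.pySetD, PySem.List.pySet?, hy]
      simp [pvSetCell, pvCellId, hy, hx, hy', h1, h2, pvCset, hrow]

theorem pvCset_length (d : List (List String)) (rc : Nat × Nat) (v : String) :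
    (pvCset d rc v).length = d.length := by
  simp [pvCset]

theorem pvCset_row_length (d : List (List String)) (rc : Nat × Nat) (v : String) (r : Nat) :
    (((pvCset d rc v)[r]?).getD []).length = ((d[r]?).getD []).length := by
  simp only [pvCset]
  rw [List.getElem?_set]
  split_ifs with h1 h2
  · subst h1
    simp [List.getElem?_eq_getElem h2]
  · subst h1
    have hd : d[rc.1]? = (none : Option (List String)) := List.getElem?_eq_none_iff.2 (by omega)
    simp [hd]
  · rfl

theorem pvShape_cset {d e : List (List String)} (h : pvShape d e) (rc : Nat × Nat) (v : String) :
    pvShape (pvCset d rc v) e :=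
  ⟨by rw [pvCset_length]; exact h.1, fun r => by rw [pvCset_row_length]; exact h.2 r⟩

theorem pvCellId_congr {d e : List (List String)} (h : pvShape d e) (p : Int × Int) :
    pvCellId d p = pvCellId e p := by
  simp only [pvCellId, h.1]
  cases PySem.List.pyIdx? e.length p.2 with
  | none => rfl
  | some r => simp [h.2 r]

theorem pvValid_of_shape {d e : List (List String)} (h : pvShape d e) {rc : Nat × Nat}
    (hv : pvValid e rc) : pvValid d rc :=
  ⟨by rw [h.1]; exact hv.1, by rw [h.2 rc.1]; exact hv.2⟩

theorem pvCget_isSome {d : List (List String)} {rc : Nat × Nat} (h : pvValid d rc) :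
    ∃ s, pvCget d rc = some s := by
  exact ⟨_, List.getElem?_eq_getElem h.2⟩

theorem pvCget_cset_self {d : List (List String)} {rc : Nat × Nat} (h : pvValid d rc) (v : String) :
    pvCget (pvCset d rc v) rc = some v := by
  simp only [pvCget, pvCset]
  rw [List.getElem?_set_self h.1]
  simp [List.getElem?_set_self h.2]

theorem pvCget_cset_ne (d : List (List String)) {rc rc' : Nat × Nat} (h : rc' ≠ rc) (v : String) :
    pvCget (pvCset d rc v) rc' = pvCget d rc' := by
  obtain ⟨a, b⟩ := rc
  obtain ⟨a', b'⟩ := rc'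
  simp only [pvCget, pvCset]
  by_cases h1 : a = a'
  · subst h1
    have h2 : b ≠ b' := by
      intro e
      exact h (by simp [e])
    rw [List.getElem?_set]
    by_cases hl : a < d.length
    · simp [if_pos hl, List.getElem?_set_ne h2, List.getElem?_eq_getElem hl]
    · have hd : d[a]? = (none : Option (List String)) := List.getElem?_eq_none_iff.2 (by omega)
      simp [if_neg hl, hd]
  · rw [List.getElem?_set_ne h1]

theorem pvGrid_ext {d e : List (List String)} (h : pvShape d e)
    (hc : ∀ rc : Nat × Nat, pvCget d rc = pvCget e rc) : d = e := by
  have hl : d.length = e.length := h.1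
  apply List.ext_getElem?
  intro r
  by_cases hr : r < e.length
  · have hrd : r < d.length := by rw [hl]; exact hr
    have hd := List.getElem?_eq_getElem hrd
    have he := List.getElem?_eq_getElem hr
    rw [hd, he, Option.some_inj]
    apply List.ext_getElem?
    intro c
    have hc' := hc (r, c)
    simpa [pvCget, hd, he] using hc'
  · rw [List.getElem?_eq_none_iff.2 (by omega), List.getElem?_eq_none_iff.2 (by omega)]

-- the hypothesis package Pre_ provides for a fixed walk length k
structure PvCtx (point dir : Int × Int) (data : List (List String)) (k : Nat) : Prop where
  bound : k < pvCells data + 1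
  val_lt : ∀ i < k, pvGetCell data (pvPath point dir i).1 (pvPath point dir i).2 ≠ none ∧
                    pvGetCell data (pvPath point dir i).1 (pvPath point dir i).2 ≠ some "."
  val_k : pvGetCell data (pvPath point dir k).1 (pvPath point dir k).2 = some "."
  dist : ∀ i < k, ∀ j < k, i ≠ j →
           pvCellId data (pvPath point dir i) ≠ pvCellId data (pvPath point dir j)

-- the resolved cell of the i-th point of the walk
def pvRC (point dir : Int × Int) (data : List (List String)) (i : Nat) : Nat × Nat :=
  (pvCellId data (pvPath point dir i)).getD (0, 0)

theorem pvCtx_cellId {point dir : Int × Int} {data : List (List String)} {k : Nat}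
    (ctx : PvCtx point dir data k) {i : Nat} (hi : i ≤ k) :
    pvCellId data (pvPath point dir i) = some (pvRC point dir data i) := by
  have hne : pvGetCell data (pvPath point dir i).1 (pvPath point dir i).2 ≠ none := by
    rcases Nat.lt_or_ge i k with h | h
    · exact (ctx.val_lt i h).1
    · have : i = k := by omega
      rw [this, ctx.val_k]
      simp
  rw [pvGetCell_eq] at hne
  cases hcell : pvCellId data (pvPath point dir i) with
  | none => rw [hcell] at hne; simp at hne
  | some rc => simp [pvRC, hcell]

theorem pvCtx_valid {point dir : Int × Int} {data : List (List String)} {k : Nat}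
    (ctx : PvCtx point dir data k) {i : Nat} (hi : i ≤ k) :
    pvValid data (pvRC point dir data i) :=
  pvCellId_valid (pvCtx_cellId ctx hi)

theorem pvCtx_cget {point dir : Int × Int} {data : List (List String)} {k : Nat}
    (ctx : PvCtx point dir data k) {i : Nat} (hi : i ≤ k) :
    pvCget data (pvRC point dir data i) =
      pvGetCell data (pvPath point dir i).1 (pvPath point dir i).2 := by
  rw [pvGetCell_eq, pvCtx_cellId ctx hi]
  rfl

theorem pvCtx_rc_ne {point dir : Int × Int} {data : List (List String)} {k : Nat}
    (ctx : PvCtx point dir data k) {i j : Nat} (hi : i ≤ k) (hj : j ≤ k) (hne : i ≠ j) :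
    pvRC point dir data i ≠ pvRC point dir data j := by
  intro he
  rcases Nat.lt_or_ge i k with h1 | h1
  · rcases Nat.lt_or_ge j k with h2 | h2
    · exact ctx.dist i h1 j h2 hne (by rw [pvCtx_cellId ctx hi, pvCtx_cellId ctx hj, he])
    · have hj' : j = k := by omega
      have := (ctx.val_lt i h1).2
      rw [← pvCtx_cget ctx hi, he, pvCtx_cget ctx hj, hj', ctx.val_k] at this
      exact this rfl
  · have hi' : i = k := by omega
    rcases Nat.lt_or_ge j k with h2 | h2
    · have := (ctx.val_lt j h2).2
      rw [← pvCtx_cget ctx hj, ← he, pvCtx_cget ctx hi, hi', ctx.val_k] at this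
      exact this rfl
    · omega

theorem pvPushLoop_run {point dir : Int × Int} {data : List (List String)} {k : Nat}
    (ctx : PvCtx point dir data k) :
    ∀ (fuel j : Nat) (d : List (List String)) (carry : String),
      j ≤ k → k - j < fuel → pvShape d data →
      (∀ i, j ≤ i → i ≤ k →
        pvCget d (pvRC point dir data i) = pvCget data (pvRC point dir data i)) →
      pvShape (pvPushLoop dir fuel (pvPath point dir j).1 (pvPath point dir j).2 carry d) data ∧
      pvCget (pvPushLoop dir fuel (pvPath point dir j).1 (pvPath point dir j).2 carry d)
          (pvRC point dir data j) = some carry ∧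
      (∀ i, j < i → i ≤ k →
        pvCget (pvPushLoop dir fuel (pvPath point dir j).1 (pvPath point dir j).2 carry d)
            (pvRC point dir data i) = pvCget data (pvRC point dir data (i - 1))) ∧
      (∀ rc' : Nat × Nat, (∀ i, j ≤ i → i ≤ k → rc' ≠ pvRC point dir data i) →
        pvCget (pvPushLoop dir fuel (pvPath point dir j).1 (pvPath point dir j).2 carry d) rc' =
          pvCget d rc') := by
  intro fuel
  induction fuel with
  | zero => intro j d carry hj hfuel; omega
  | succ f ih =>
    intro j d carry hj hfuel hshape hinv
    have hid : pvCellId d (pvPath point dir j) = some (pvRC point dir data j) := by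
      rw [pvCellId_congr hshape, pvCtx_cellId ctx hj]
    have hvalid : pvValid d (pvRC point dir data j) :=
      pvValid_of_shape hshape (pvCtx_valid ctx hj)
    have hread : pvGetCell d (pvPath point dir j).1 (pvPath point dir j).2 =
        pvGetCell data (pvPath point dir j).1 (pvPath point dir j).2 := by
      rw [pvGetCell_eq d (pvPath point dir j), hid, Option.bind_some,
        hinv j le_rfl hj, pvCtx_cget ctx hj]
    have hsetj : pvSetCell d (pvPath point dir j).1 (pvPath point dir j).2 carry =
        pvCset d (pvRC point dir data j) carry := by
      rw [pvSetCell_eq d (pvPath point dir j) carry, hid]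
    rcases Nat.lt_or_ge j k with hjk | hjk
    · -- j < k : the cell holds a box, write the carry and recurse
      obtain ⟨hnn, hnd⟩ := ctx.val_lt j hjk
      obtain ⟨v, hv⟩ : ∃ v, pvGetCell data (pvPath point dir j).1 (pvPath point dir j).2 = some v := by
        cases h : pvGetCell data (pvPath point dir j).1 (pvPath point dir j).2 with
        | none => exact absurd h hnn
        | some v => exact ⟨v, rfl⟩
      have hvne : v ≠ "." := by
        intro h
        rw [h] at hv
        exact hnd hv
      have hstep : pvPushLoop dir (f + 1) (pvPath point dir j).1 (pvPath point dir j).2 carry d =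
          pvPushLoop dir f (pvPath point dir (j + 1)).1 (pvPath point dir (j + 1)).2 v
            (pvCset d (pvRC point dir data j) carry) := by
        simp only [pvPushLoop, hread, hv, if_neg hvne, hsetj]
        have h1 : (pvPath point dir j).1 + dir.1 = (pvPath point dir (j + 1)).1 := by
          simp [pvPath]; ring
        have h2 : (pvPath point dir j).2 + dir.2 = (pvPath point dir (j + 1)).2 := by
          simp [pvPath]; ring
        rw [h1, h2]
      have hshape' : pvShape (pvCset d (pvRC point dir data j) carry) data :=
        pvShape_cset hshape _ _
      have hinv' : ∀ i, j + 1 ≤ i → i ≤ k →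
          pvCget (pvCset d (pvRC point dir data j) carry) (pvRC point dir data i) =
            pvCget data (pvRC point dir data i) := by
        intro i h1 h2
        rw [pvCget_cset_ne d (pvCtx_rc_ne ctx h2 hj (by omega)) carry]
        exact hinv i (by omega) h2
      obtain ⟨sh, hcarry, hmid, hout⟩ :=
        ih (j + 1) (pvCset d (pvRC point dir data j) carry) v (by omega) (by omega) hshape' hinv'
      rw [hstep]
      refine ⟨sh, ?_, ?_, ?_⟩
      · rw [hout (pvRC point dir data j) (fun i h1 h2 => pvCtx_rc_ne ctx hj h2 (by omega)),
          pvCget_cset_self hvalid]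
      · intro i h1 h2
        rcases Nat.lt_or_ge (j + 1) i with h3 | h3
        · exact hmid i h3 h2
        · have : i = j + 1 := by omega
          rw [this, hcarry]
          have : j + 1 - 1 = j := by omega
          rw [this, pvCtx_cget ctx hj, hv]
      · intro rc' hrc'
        rw [hout rc' (fun i h1 h2 => hrc' i (by omega) h2),
          pvCget_cset_ne d (hrc' j le_rfl hj) carry]
    · -- j = k : the cell is ".", write the carry and stop
      have hjk' : j = k := by omega
      have hdot : pvGetCell data (pvPath point dir j).1 (pvPath point dir j).2 = some "." := by
        rw [hjk']; exact ctx.val_k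
      have hstep : pvPushLoop dir (f + 1) (pvPath point dir j).1 (pvPath point dir j).2 carry d =
          pvCset d (pvRC point dir data j) carry := by
        simp only [pvPushLoop, hread, hdot, hsetj]
        simp
      rw [hstep]
      refine ⟨pvShape_cset hshape _ _, pvCget_cset_self hvalid carry, ?_, ?_⟩
      · intro i h1 h2
        omega
      · intro rc' hrc'
        exact pvCget_cset_ne d (hrc' j le_rfl hj) carry

theorem pvPath_zero (point dir : Int × Int) : pvPath point dir 0 = point := by
  simp [pvPath]

theorem pvPath_succ (point dir : Int × Int) (j : Nat) :
    ((pvPath point dir j).1 + dir.1, (pvPath point dir j).2 + dir.2) = pvPath point dir (j + 1) := by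
  simp only [pvPath, Prod.mk.injEq]
  constructor <;> (push_cast; ring)

theorem pvScanA_run {point dir : Int × Int} {data : List (List String)} {k : Nat}
    (ctx : PvCtx point dir data k) :
    ∀ (fuel j : Nat), j ≤ k → k - j < fuel →
      pvScanA dir data fuel (pvPath point dir j) =
        some ((List.range (k + 1 - j)).map fun t => pvPath point dir (j + t)) := by
  intro fuel
  induction fuel with
  | zero => intro j hj hf; omega
  | succ f ih =>
    intro j hj hf
    rcases Nat.lt_or_ge j k with hjk | hjk
    · obtain ⟨hnn, hnd⟩ := ctx.val_lt j hjk
      obtain ⟨v, hv⟩ : ∃ v, pvGetCell data (pvPath point dir j).1 (pvPath point dir j).2 = some v := by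
        cases h : pvGetCell data (pvPath point dir j).1 (pvPath point dir j).2 with
        | none => exact absurd h hnn
        | some v => exact ⟨v, rfl⟩
      have hvne : v ≠ "." := fun h => hnd (h ▸ hv)
      have hrec := ih (j + 1) (by omega) (by omega)
      simp only [pvScanA, hv, if_neg hvne, pvPath_succ point dir j, hrec]
      have h1 : k + 1 - j = (k - j) + 1 := by omega
      have h2 : k + 1 - (j + 1) = k - j := by omega
      rw [h1, h2, List.range_succ_eq_map]
      simp only [List.map_cons, List.map_map]
      rw [Option.some_inj]
      congr 1
      apply List.map_congr_left
      intro t ht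
      congr 1
      omega
    · have hjk' : j = k := by omega
      have hdot : pvGetCell data (pvPath point dir j).1 (pvPath point dir j).2 = some "." := by
        rw [hjk']; exact ctx.val_k
      simp only [pvScanA, hdot]
      have h1 : k + 1 - j = 1 := by omega
      rw [h1]
      simp

theorem pvPoints_get (point dir : Int × Int) (k j : Nat) (hj : j ≤ k) :
    PySem.List.pyGetD ((List.range (k + 1)).map fun t => pvPath point dir t) (j : Int) (0, 0) =
      pvPath point dir j := by
  rw [PySem.List.pyGetD_natCast]
  simp [List.getD, Nat.lt_succ_of_le hj]

theorem pvShape_trans {d e g : List (List String)} (h1 : pvShape d g) (h2 : pvShape e g) :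
    pvShape d e :=
  ⟨h1.1.trans h2.1.symm, fun r => (h1.2 r).trans (h2.2 r).symm⟩

theorem pvSwapFold_run {point dir : Int × Int} {data : List (List String)} {k : Nat}
    (ctx : PvCtx point dir data k) :
    ∀ (j : Nat) (d : List (List String)), j ≤ k → pvShape d data →
      pvShape ((PySem.List.pyRange (j : Int) 0 (-1)).foldl
        (pvSwapStep ((List.range (k + 1)).map fun t => pvPath point dir t)) d) data ∧
      pvCget ((PySem.List.pyRange (j : Int) 0 (-1)).foldl
          (pvSwapStep ((List.range (k + 1)).map fun t => pvPath point dir t)) d)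
          (pvRC point dir data 0) = pvCget d (pvRC point dir data j) ∧
      (∀ i, 1 ≤ i → i ≤ j →
        pvCget ((PySem.List.pyRange (j : Int) 0 (-1)).foldl
            (pvSwapStep ((List.range (k + 1)).map fun t => pvPath point dir t)) d)
            (pvRC point dir data i) = pvCget d (pvRC point dir data (i - 1))) ∧
      (∀ rc' : Nat × Nat, (∀ i, i ≤ j → rc' ≠ pvRC point dir data i) →
        pvCget ((PySem.List.pyRange (j : Int) 0 (-1)).foldl
            (pvSwapStep ((List.range (k + 1)).map fun t => pvPath point dir t)) d) rc' =
          pvCget d rc') := by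
  intro j
  induction j with
  | zero =>
    intro d hj hshape
    rw [PySem.List.pyRange_neg_one_eq_nil (by norm_num)]
    exact ⟨hshape, rfl, fun i h1 h2 => by omega, fun rc' h => rfl⟩
  | succ j ihj =>
    intro d hj hshape
    have hcons : PySem.List.pyRange ((j + 1 : Nat) : Int) 0 (-1) =
        ((j + 1 : Nat) : Int) :: PySem.List.pyRange ((j : Nat) : Int) 0 (-1) := by
      rw [PySem.List.pyRange_neg_one_cons (by positivity)]
      norm_num
    rw [hcons, List.foldl_cons]
    -- evaluate the single swap step
    have hp1 : PySem.List.pyGetD ((List.range (k + 1)).map fun t => pvPath point dir t)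
        ((j + 1 : Nat) : Int) (0, 0) = pvPath point dir (j + 1) := pvPoints_get point dir k (j + 1) hj
    have hp2 : PySem.List.pyGetD ((List.range (k + 1)).map fun t => pvPath point dir t)
        (((j + 1 : Nat) : Int) - 1) (0, 0) = pvPath point dir j := by
      have : ((j + 1 : Nat) : Int) - 1 = ((j : Nat) : Int) := by push_cast; ring
      rw [this]
      exact pvPoints_get point dir k j (by omega)
    have hidj : pvCellId d (pvPath point dir j) = some (pvRC point dir data j) := by
      rw [pvCellId_congr hshape, pvCtx_cellId ctx (by omega : j ≤ k)]
    have hidj1 : pvCellId d (pvPath point dir (j + 1)) = some (pvRC point dir data (j + 1)) := by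
      rw [pvCellId_congr hshape, pvCtx_cellId ctx hj]
    have hvj : pvValid d (pvRC point dir data j) :=
      pvValid_of_shape hshape (pvCtx_valid ctx (by omega : j ≤ k))
    have hvj1 : pvValid d (pvRC point dir data (j + 1)) :=
      pvValid_of_shape hshape (pvCtx_valid ctx hj)
    obtain ⟨s0, hs0⟩ := pvCget_isSome hvj
    obtain ⟨s1, hs1⟩ := pvCget_isSome hvj1
    have hgj : pvGetCellD d (pvPath point dir j).1 (pvPath point dir j).2 = s0 := by
      rw [pvGetCellD, pvGetCell_eq d (pvPath point dir j), hidj, Option.bind_some, hs0]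
      rfl
    have hgj1 : pvGetCellD d (pvPath point dir (j + 1)).1 (pvPath point dir (j + 1)).2 = s1 := by
      rw [pvGetCellD, pvGetCell_eq d (pvPath point dir (j + 1)), hidj1, Option.bind_some, hs1]
      rfl
    have hne : pvRC point dir data j ≠ pvRC point dir data (j + 1) :=
      pvCtx_rc_ne ctx (by omega) hj (by omega)
    have hstep : pvSwapStep ((List.range (k + 1)).map fun t => pvPath point dir t) d
        ((j + 1 : Nat) : Int) =
        pvCset (pvCset d (pvRC point dir data (j + 1)) s0) (pvRC point dir data j) s1 := by
      simp only [pvSwapStep, hp1, hp2, hgj, hgj1]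
      rw [pvSetCell_eq d (pvPath point dir (j + 1)) s0, hidj1]
      have hsh1 : pvShape (pvCset d (pvRC point dir data (j + 1)) s0) data :=
        pvShape_cset hshape _ _
      rw [pvSetCell_eq _ (pvPath point dir j) s1,
        pvCellId_congr hsh1, pvCtx_cellId ctx (by omega : j ≤ k)]
    rw [hstep]
    set d2 := pvCset (pvCset d (pvRC point dir data (j + 1)) s0) (pvRC point dir data j) s1 with hd2
    have hsh2 : pvShape d2 data := pvShape_cset (pvShape_cset hshape _ _) _ _
    have hc_j : pvCget d2 (pvRC point dir data j) = some s1 := by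
      rw [hd2, pvCget_cset_self (pvValid_of_shape (pvShape_cset hshape _ _) (pvCtx_valid ctx (by omega : j ≤ k)))]
    have hc_j1 : pvCget d2 (pvRC point dir data (j + 1)) = some s0 := by
      rw [hd2, pvCget_cset_ne _ (Ne.symm hne) s1, pvCget_cset_self hvj1]
    have hc_other : ∀ rc' : Nat × Nat, rc' ≠ pvRC point dir data j →
        rc' ≠ pvRC point dir data (j + 1) → pvCget d2 rc' = pvCget d rc' := by
      intro rc' h1 h2
      rw [hd2, pvCget_cset_ne _ h1 s1, pvCget_cset_ne _ h2 s0]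
    obtain ⟨sh, h0, hmid, hout⟩ := ihj d2 (by omega) hsh2
    refine ⟨sh, ?_, ?_, ?_⟩
    · rw [h0, hc_j, ← hs1]
    · intro i h1 h2
      rcases Nat.lt_or_ge j i with h3 | h3
      · have hi : i = j + 1 := by omega
        rw [hi, hout (pvRC point dir data (j + 1))
            (fun i' h' => Ne.symm (pvCtx_rc_ne ctx (by omega) hj (by omega))),
          hc_j1, ← hs0]
        norm_num
      · rw [hmid i h1 h3]
        exact hc_other _ (pvCtx_rc_ne ctx (by omega) (by omega) (by omega))
          (pvCtx_rc_ne ctx (by omega) hj (by omega))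
    · intro rc' hrc'
      rw [hout rc' (fun i h => hrc' i (by omega)),
        hc_other rc' (hrc' j (by omega)) (hrc' (j + 1) (by omega))]

theorem push_boxes_main (point dir : Int × Int) (data : List (List String))
    (hpre : Pre_push_boxes point dir data) :
    push_boxes point dir data = push_boxes_alt point dir data := by
  obtain ⟨k, hk, hlt, hkdot, hdist⟩ := hpre
  have ctx : PvCtx point dir data k := ⟨hk, hlt, hkdot, hdist⟩
  -- A's scan returns the path points
  have hscan := pvScanA_run ctx (pvCells data + 1) 0 (by omega) (by omega)
  rw [pvPath_zero] at hscan
  have hpts : (List.range (k + 1 - 0)).map (fun t => pvPath point dir (0 + t)) =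
      (List.range (k + 1)).map fun t => pvPath point dir t := by norm_num
  rw [hpts] at hscan
  have hlen : (((List.range (k + 1)).map fun t => pvPath point dir t).length : Int) - 1 =
      ((k : Nat) : Int) := by
    simp
  -- A's result
  obtain ⟨shA, hA0, hAmid, hAout⟩ := pvSwapFold_run ctx k data le_rfl (pvShape_refl data)
  -- B's result
  have hB := pvPushLoop_run ctx (pvCells data + 1) 0 data "." (by omega) (by omega)
    (pvShape_refl data) (fun i _ _ => rfl)
  rw [pvPath_zero] at hB
  obtain ⟨shB, hB0, hBmid, hBout⟩ := hB
  unfold push_boxes push_boxes_alt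
  simp only [hscan, hlen]
  apply pvGrid_ext (pvShape_trans shA shB)
  intro rc'
  by_cases hex : ∃ i, i ≤ k ∧ rc' = pvRC point dir data i
  · obtain ⟨i, hi, rfl⟩ := hex
    cases i with
    | zero =>
      rw [hA0, hB0, pvCtx_cget ctx le_rfl, ctx.val_k]
    | succ m =>
      rw [hAmid (m + 1) (by omega) hi, hBmid (m + 1) (by omega) hi]
  · have hex' : ∀ i, i ≤ k → rc' ≠ pvRC point dir data i :=
      fun i h he => hex ⟨i, h, he⟩
    rw [hAout rc' hex', hBout rc' (fun i _ h => hex' i h)]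

-- ===== VERDICT (by name: the statement is the Claim_ definition above) =====
theorem push_boxes_spec : Claim_equal_push_boxes := by
  intro point dir data _hdom hpre
  show push_boxes point dir data = push_boxes_alt point dir data
  exact push_boxes_main point dir data hpre
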